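-- pv_equiv track=rewrite | github.com/hoclz/code_format | app.py | format_vba_code
-- ===== SOURCE A (Python) =====
-- def minimal_cleanup_for_non_python(raw_code: str) -> str:
--     """
--     A minimal cleanup approach:
--       - Strip trailing spaces
--       - Remove excessive empty lines
--     """
--     lines = raw_code.split("\n")
--     lines = [line.rstrip() for line in lines]
--     cleaned_lines = []
--     last_line_blank = False
--     for line in lines:
--         if line.strip() == "":
--             if last_line_blank:
--                 continue
--             last_line_blank = True
--         else:
--             last_line_blank = False
--         cleaned_lines.append(line)
--     return "\n".join(cleaned_lines)
--
-- def format_vba_code(raw_code: str) -> str: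
--     """
--     A basic formatter for VBA code:
--       - Cleans up extra spaces and empty lines.
--       - Applies simple block indentation based on common VBA block keywords.
--     """
--     cleaned = minimal_cleanup_for_non_python(raw_code)
--     lines = cleaned.split("\n")
--     formatted_lines = []
--     indent_level = 0
--
--     # Define VBA block starting and ending keywords
--     vba_block_start = ("sub ", "function ", "if ", "for ", "while ", "select case", "with")
--     vba_block_end = ("end sub", "end function", "end if", "next", "wend", "end select", "end with")
--
--     for line in lines:
--         stripped = line.strip()
--         lower_stripped = stripped.lower()
--         # Check if the line is a block-ending keyword
--         if any(lower_stripped.startswith(kw) for kw in vba_block_end):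
--             indent_level = max(indent_level - 1, 0)
--             formatted_lines.append("    " * indent_level + stripped)
--         # Special handling for Else to align with If
--         elif lower_stripped == "else" or lower_stripped.startswith("else "):
--             indent_level = max(indent_level - 1, 0)
--             formatted_lines.append("    " * indent_level + stripped)
--             indent_level += 1
--         else:
--             formatted_lines.append("    " * indent_level + stripped)
--             if any(lower_stripped.startswith(kw) for kw in vba_block_start):
--                 indent_level += 1
--
--     return "\n".join(formatted_lines)
-- ===== SOURCE B (Python) =====
-- def format_vba_code(raw_code: str) -> str:
--     """Single pass: cleanup (rstrip + blank-line collapse) and indentation fused."""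
--     block_start = ("sub ", "function ", "if ", "for ", "while ", "select case", "with")
--     block_end = ("end sub", "end function", "end if", "next", "wend", "end select", "end with")
--     out = []
--     indent_level = 0
--     last_blank = False
--     for line in raw_code.split("\n"):
--         stripped = line.strip()
--         if stripped == "":
--             if last_blank:
--                 continue
--             last_blank = True
--             out.append("    " * indent_level)
--             continue
--         last_blank = False
--         low = stripped.lower()
--         if low.startswith(block_end):
--             indent_level = max(indent_level - 1, 0)
--             out.append("    " * indent_level + stripped)
--         elif low == "else" or low.startswith("else "):
--             indent_level = max(indent_level - 1, 0)
--             out.append("    " * indent_level + stripped)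
--             indent_level += 1
--         else:
--             out.append("    " * indent_level + stripped)
--             if low.startswith(block_start):
--                 indent_level += 1
--     return "\n".join(out)
-- ===== Notes on version B (the rewrite author's own statement) =====
-- stated objective: simpler
-- what changed: B replaces A's three-stage pipeline (rstrip+blank-collapse helper, join to a string, re-split, then a second indentation loop) by a single pass over the split lines that maintains the blank-collapse flag and the indent level together and emits each formatted line directly.
import Mathlib
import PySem

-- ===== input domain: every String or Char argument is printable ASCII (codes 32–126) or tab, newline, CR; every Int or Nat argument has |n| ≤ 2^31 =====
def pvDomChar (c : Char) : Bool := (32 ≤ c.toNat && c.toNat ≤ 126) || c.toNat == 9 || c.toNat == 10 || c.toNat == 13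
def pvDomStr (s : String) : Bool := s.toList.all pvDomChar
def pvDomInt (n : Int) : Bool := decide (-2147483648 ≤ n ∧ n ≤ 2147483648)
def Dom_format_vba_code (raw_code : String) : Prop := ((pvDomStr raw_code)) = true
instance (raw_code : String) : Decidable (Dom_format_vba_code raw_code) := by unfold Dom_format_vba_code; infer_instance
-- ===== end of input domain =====

-- B fuses A's three stages (rstrip + blank-line collapse, join/re-split, indentation pass) into one loop over the split lines; objective: simpler.

-- ===== PORT A =====
-- the two keyword tuples of A
def vbaBlockStart : List (List Char) :=
  ["sub ".toList, "function ".toList, "if ".toList, "for ".toList, "while ".toList,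
   "select case".toList, "with".toList]

def vbaBlockEnd : List (List Char) :=
  ["end sub".toList, "end function".toList, "end if".toList, "next".toList, "wend".toList,
   "end select".toList, "end with".toList]

-- "    " * indent_level  (Python repetition; a negative count gives "")
def indentChars (n : Int) : List Char := (List.replicate n.toNat "    ".toList).flatten

-- loop body of minimal_cleanup_for_non_python; state = (cleaned_lines, last_line_blank)
def cleanStep (st : List (List Char) × Bool) (line : List Char) : List (List Char) × Bool :=
  if PySem.Chars.strip line = [] then
    if st.2 then st else (st.1 ++ [line], true)
  else
    (st.1 ++ [line], false)

def minimal_cleanup_for_non_python (raw_code : List Char) : List Char :=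
  let lines := PySem.Chars.splitOn raw_code ['\n']
  let lines := lines.map PySem.Chars.rstrip
  PySem.Chars.join ['\n'] (lines.foldl cleanStep ([], false)).1

-- loop body of A's formatting loop; state = (indent_level, formatted_lines)
def fmtStep (st : Int × List (List Char)) (line : List Char) : Int × List (List Char) :=
  let stripped := PySem.Chars.strip line
  let low := PySem.Chars.lower stripped
  if vbaBlockEnd.any (fun kw => PySem.Chars.startswith low kw) then
    (max (st.1 - 1) 0, st.2 ++ [indentChars (max (st.1 - 1) 0) ++ stripped])
  else if low = "else".toList ∨ PySem.Chars.startswith low "else ".toList then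
    (max (st.1 - 1) 0 + 1, st.2 ++ [indentChars (max (st.1 - 1) 0) ++ stripped])
  else if vbaBlockStart.any (fun kw => PySem.Chars.startswith low kw) then
    (st.1 + 1, st.2 ++ [indentChars st.1 ++ stripped])
  else
    (st.1, st.2 ++ [indentChars st.1 ++ stripped])

def format_vba_code (raw_code : String) : String :=
  let cleaned := minimal_cleanup_for_non_python raw_code.toList
  let lines := PySem.Chars.splitOn cleaned ['\n']
  String.ofList (PySem.Chars.join ['\n'] (lines.foldl fmtStep (0, [])).2)

-- ===== PORT B =====
-- loop body of B's single pass; state = (last_blank, indent_level, out)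
def bStep (st : Bool × Int × List (List Char)) (line : List Char) : Bool × Int × List (List Char) :=
  let stripped := PySem.Chars.strip line
  if stripped = [] then
    if st.1 then st else (true, st.2.1, st.2.2 ++ [indentChars st.2.1])
  else
    let low := PySem.Chars.lower stripped
    if vbaBlockEnd.any (fun kw => PySem.Chars.startswith low kw) then
      (false, max (st.2.1 - 1) 0, st.2.2 ++ [indentChars (max (st.2.1 - 1) 0) ++ stripped])
    else if low = "else".toList ∨ PySem.Chars.startswith low "else ".toList then
      (false, max (st.2.1 - 1) 0 + 1, st.2.2 ++ [indentChars (max (st.2.1 - 1) 0) ++ stripped])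
    else if vbaBlockStart.any (fun kw => PySem.Chars.startswith low kw) then
      (false, st.2.1 + 1, st.2.2 ++ [indentChars st.2.1 ++ stripped])
    else
      (false, st.2.1, st.2.2 ++ [indentChars st.2.1 ++ stripped])

def format_vba_code_alt (raw_code : String) : String :=
  let lines := PySem.Chars.splitOn raw_code.toList ['\n']
  String.ofList (PySem.Chars.join ['\n'] (lines.foldl bStep (false, 0, [])).2.2)


-- ===== PRECONDITION & SPEC =====
def Spec_format_vba_code (raw_code : String) (out : String) : Prop := out = format_vba_code_alt raw_code
instance (raw_code : String) (out : String) : Decidable (Spec_format_vba_code raw_code out) := by unfold Spec_format_vba_code; infer_instance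

-- ===== CLAIM (what is proved, stated in full; the proofs are below) =====
def Claim_equal_format_vba_code : Prop := ∀ (raw_code : String), Dom_format_vba_code raw_code → Spec_format_vba_code raw_code (format_vba_code raw_code)

-- ===== LEMMAS AND PROOFS =====

theorem splitOn_go_char (c : Char) : ∀ (fuel : Nat) (l cur : List Char) (accs : List (List Char)),
    l.length < fuel →
    PySem.Chars.splitOn.go [c] fuel l cur accs =
      accs.reverse ++ List.modifyHead (cur.reverse ++ ·) (List.splitOnP (· == c) l) := by
  intro fuel
  induction fuel with
  | zero => intro l cur accs h; omega
  | succ n ih =>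
    intro l cur accs h
    cases l with
    | nil =>
      simp [PySem.Chars.splitOn.go, List.splitOnP_nil]
    | cons x rest =>
      simp only [PySem.Chars.splitOn.go]
      by_cases hx : x = c
      · subst hx
        rw [if_pos (by simp)]
        simp only [List.length_cons, List.length_nil, List.drop_succ_cons, List.drop_zero]
        rw [ih rest [] (cur.reverse :: accs) (by simp at h ⊢; omega)]
        simp [List.splitOnP_cons]
        exact congrFun List.modifyHead_id _
      · rw [if_neg (by simp [List.isPrefixOf]; exact fun hh => hx (by simp [hh]) )]
        rw [ih rest (x :: cur) accs (by simp at h ⊢; omega)]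
        rw [List.splitOnP_cons]
        rw [if_neg (by simp; exact fun hh => hx hh)]
        rw [List.modifyHead_modifyHead]
        have hf : ((fun y => cur.reverse ++ y) ∘ List.cons x) = (fun y => (x :: cur).reverse ++ y) := by
          funext y; simp
        rw [hf]

theorem pysem_splitOn_single (c : Char) (l : List Char) :
    PySem.Chars.splitOn l [c] = List.splitOnP (· == c) l := by
  rw [PySem.Chars.splitOn, splitOn_go_char c (l.length + 1) l [] [] (by omega)]
  simp
  exact congrFun List.modifyHead_id _

theorem mem_splitOnP_not (c : Char) (l : List Char) :
    ∀ y ∈ List.splitOnP (· == c) l, c ∉ y := by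
  induction l with
  | nil => intro y hy; simp [List.splitOnP_nil] at hy; simp [hy]
  | cons x rest ih =>
    intro y hy
    rw [List.splitOnP_cons] at hy
    by_cases hx : x = c
    · rw [if_pos (by simp [hx])] at hy
      rcases List.mem_cons.mp hy with h | h
      · simp [h]
      · exact ih y h
    · rw [if_neg (by simp [hx])] at hy
      rcases hsp : List.splitOnP (fun y => y == c) rest with _ | ⟨a, as⟩
      · exact absurd hsp (List.splitOnP_ne_nil _ _)
      · rw [hsp] at hy
        simp only [List.modifyHead] at hy
        rcases List.mem_cons.mp hy with h | h
        · subst h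
          intro hm
          rcases List.mem_cons.mp hm with h' | h'
          · exact hx h'.symm
          · exact ih a (by rw [hsp]; simp) h'
        · exact ih y (by rw [hsp]; simp [h])

theorem rstrip_eq_rdropWhile (l : List Char) :
    PySem.Chars.rstrip l = List.rdropWhile PySem.Chars.isspace l := rfl

theorem lstrip_eq_dropWhile (l : List Char) :
    PySem.Chars.lstrip l = List.dropWhile PySem.Chars.isspace l := rfl

theorem dropWhile_rdropWhile_comm (p : Char → Bool) (l : List Char) :
    List.dropWhile p (List.rdropWhile p l) = List.rdropWhile p (List.dropWhile p l) := by
  induction l using List.reverseRecOn with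
  | nil => simp
  | append_singleton l a ih =>
    by_cases hp : p a
    · rw [List.rdropWhile_concat_pos _ _ _ hp, ih, List.dropWhile_append]
      rcases hdl : List.dropWhile p l with _ | ⟨b, bs⟩
      · simp [hp, List.rdropWhile]
      · simp only [List.isEmpty_cons, Bool.false_eq_true, if_false]
        rw [List.rdropWhile_concat_pos _ _ _ hp]
    · rw [List.rdropWhile_concat_neg _ _ _ hp, List.dropWhile_append]
      rcases hdl : List.dropWhile p l with _ | ⟨b, bs⟩
      · simp [List.rdropWhile_singleton, hp]
      · simp only [List.isEmpty_cons, Bool.false_eq_true, if_false]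
        rw [List.rdropWhile_concat_neg _ _ _ hp]

theorem strip_rstrip (l : List Char) :
    PySem.Chars.strip (PySem.Chars.rstrip l) = PySem.Chars.strip l := by
  rw [PySem.Chars.strip, PySem.Chars.strip, lstrip_eq_dropWhile, lstrip_eq_dropWhile,
    rstrip_eq_rdropWhile, rstrip_eq_rdropWhile, rstrip_eq_rdropWhile,
    dropWhile_rdropWhile_comm, List.rdropWhile_idempotent]

theorem mem_rstrip {c : Char} {l : List Char} (h : c ∈ PySem.Chars.rstrip l) : c ∈ l := by
  rw [rstrip_eq_rdropWhile] at h
  rw [List.rdropWhile] at h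
  rw [List.mem_reverse] at h
  exact List.mem_reverse.mp (List.dropWhile_sublist _ |>.mem h)

theorem clean_acc (xs : List (List Char)) : ∀ (acc : List (List Char)) (lb : Bool),
    xs.foldl cleanStep (acc, lb) =
      (acc ++ (xs.foldl cleanStep ([], lb)).1, (xs.foldl cleanStep ([], lb)).2) := by
  induction xs with
  | nil => intro acc lb; simp
  | cons x rest ih =>
    intro acc lb
    simp only [List.foldl_cons]
    by_cases hb : PySem.Chars.strip x = []
    · cases lb with
      | true => simp only [cleanStep, hb, if_pos, if_true]; exact ih acc true
      | false =>
        simp only [cleanStep, hb, if_pos, Bool.false_eq_true, if_false]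
        rw [ih (acc ++ [x]) true, ih ([] ++ [x]) true]
        simp
    · simp only [cleanStep, if_neg hb]
      rw [ih (acc ++ [x]) false, ih ([] ++ [x]) false]
      simp

theorem mem_clean (xs : List (List Char)) : ∀ (lb : Bool) (y : List Char),
    y ∈ (xs.foldl cleanStep ([], lb)).1 → y ∈ xs := by
  induction xs with
  | nil => intro lb y h; simp at h
  | cons x rest ih =>
    intro lb y h
    simp only [List.foldl_cons] at h
    by_cases hb : PySem.Chars.strip x = []
    · cases lb with
      | true =>
        simp only [cleanStep, hb, if_pos, if_true] at h
        exact List.mem_cons_of_mem _ (ih true y h)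
      | false =>
        simp only [cleanStep, hb, if_pos, Bool.false_eq_true, if_false] at h
        rw [clean_acc rest ([] ++ [x]) true] at h
        simp only [Prod.fst] at h
        rcases List.mem_append.mp h with h' | h'
        · simp at h'; simp [h']
        · exact List.mem_cons_of_mem _ (ih true y h')
    · simp only [cleanStep, if_neg hb] at h
      rw [clean_acc rest ([] ++ [x]) false] at h
      simp only [Prod.fst] at h
      rcases List.mem_append.mp h with h' | h'
      · simp at h'; simp [h']
      · exact List.mem_cons_of_mem _ (ih false y h')

theorem clean_ne_nil (x : List Char) (xs : List (List Char)) :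
    ((x :: xs).foldl cleanStep ([], false)).1 ≠ [] := by
  simp only [List.foldl_cons]
  by_cases hb : PySem.Chars.strip x = []
  · simp only [cleanStep, hb, if_pos, Bool.false_eq_true, if_false]
    rw [clean_acc xs ([] ++ [x]) true]
    simp
  · simp only [cleanStep, if_neg hb]
    rw [clean_acc xs ([] ++ [x]) false]
    simp

theorem fmtStep_rstrip (st : Int × List (List Char)) (x : List Char) :
    fmtStep st (PySem.Chars.rstrip x) = fmtStep st x := by
  simp only [fmtStep, strip_rstrip]

theorem fmtStep_blank (st : Int × List (List Char)) (x : List Char)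
    (h : PySem.Chars.strip x = []) : fmtStep st x = (st.1, st.2 ++ [indentChars st.1]) := by
  simp [fmtStep, h, vbaBlockEnd, vbaBlockStart, PySem.Chars.lower, PySem.Chars.startswith,
    List.isPrefixOf]

theorem bStep_nonblank (lb : Bool) (st : Int × List (List Char)) (x : List Char)
    (h : PySem.Chars.strip x ≠ []) : bStep (lb, st) x = (false, fmtStep st x) := by
  simp only [bStep, fmtStep, if_neg h]
  split_ifs <;> rfl

theorem fusion (xs : List (List Char)) : ∀ (lb : Bool) (st : Int × List (List Char)),
    xs.foldl bStep (lb, st) =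
      (((xs.map PySem.Chars.rstrip).foldl cleanStep ([], lb)).2,
       ((xs.map PySem.Chars.rstrip).foldl cleanStep ([], lb)).1.foldl fmtStep st) := by
  induction xs with
  | nil => intro lb st; simp
  | cons x rest ih =>
    intro lb st
    simp only [List.map_cons, List.foldl_cons]
    by_cases hb : PySem.Chars.strip x = []
    · have hb' : PySem.Chars.strip (PySem.Chars.rstrip x) = [] := by rw [strip_rstrip]; exact hb
      cases lb with
      | true =>
        rw [show bStep (true, st) x = (true, st) from by simp [bStep, hb]]
        rw [show cleanStep ([], true) (PySem.Chars.rstrip x) = ([], true) from by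
          simp [cleanStep, hb']]
        exact ih true st
      | false =>
        rw [show bStep (false, st) x = (true, st.1, st.2 ++ [indentChars st.1]) from by
          simp [bStep, hb]]
        rw [show cleanStep ([], false) (PySem.Chars.rstrip x) = ([PySem.Chars.rstrip x], true) from by
          simp [cleanStep, hb']]
        rw [ih true (st.1, st.2 ++ [indentChars st.1])]
        rw [clean_acc (rest.map PySem.Chars.rstrip) [PySem.Chars.rstrip x] true]
        simp only [List.singleton_append, List.foldl_cons, Prod.fst, Prod.snd]
        rw [fmtStep_rstrip, fmtStep_blank _ _ hb]
    · have hb' : PySem.Chars.strip (PySem.Chars.rstrip x) ≠ [] := by rw [strip_rstrip]; exact hb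
      rw [bStep_nonblank lb st x hb]
      rw [show cleanStep ([], lb) (PySem.Chars.rstrip x) = ([PySem.Chars.rstrip x], false) from by
        simp only [cleanStep, if_neg hb']; rfl]
      rw [ih false (fmtStep st x)]
      rw [clean_acc (rest.map PySem.Chars.rstrip) [PySem.Chars.rstrip x] false]
      simp only [List.singleton_append, List.foldl_cons, Prod.fst, Prod.snd]
      rw [fmtStep_rstrip]

theorem splitOn_join (CL : List (List Char)) (h1 : CL ≠ [])
    (h2 : ∀ y ∈ CL, ('\n' : Char) ∉ y) :
    PySem.Chars.splitOn (PySem.Chars.join ['\n'] CL) ['\n'] = CL := by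
  rw [pysem_splitOn_single]
  have h := List.splitOn_intercalate (ls := CL) '\n' h2 h1
  simpa [List.splitOn] using h

theorem main_eq (raw : String) : format_vba_code raw = format_vba_code_alt raw := by
  unfold format_vba_code format_vba_code_alt minimal_cleanup_for_non_python
  simp only []
  rw [fusion]
  have hL : PySem.Chars.splitOn raw.toList ['\n'] ≠ [] := by
    rw [pysem_splitOn_single]; exact List.splitOnP_ne_nil _ _
  have h1 : (((PySem.Chars.splitOn raw.toList ['\n']).map PySem.Chars.rstrip).foldl
      cleanStep ([], false)).1 ≠ [] := by
    rcases hE : (PySem.Chars.splitOn raw.toList ['\n']).map PySem.Chars.rstrip with _ | ⟨x, xs⟩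
    · exact absurd (List.map_eq_nil_iff.mp hE) hL
    · exact clean_ne_nil x xs
  have h2 : ∀ y ∈ (((PySem.Chars.splitOn raw.toList ['\n']).map PySem.Chars.rstrip).foldl
      cleanStep ([], false)).1, ('\n' : Char) ∉ y := by
    intro y hy hmem
    have hy' := mem_clean _ false y hy
    rcases List.mem_map.mp hy' with ⟨z, hz, rfl⟩
    rw [pysem_splitOn_single] at hz
    exact mem_splitOnP_not '\n' raw.toList z hz (mem_rstrip hmem)
  rw [splitOn_join _ h1 h2]

-- ===== VERDICT (by name: the statement is the Claim_ definition above) =====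
theorem format_vba_code_spec : Claim_equal_format_vba_code := by
  intro raw_code _
  unfold Spec_format_vba_code
  exact main_eq raw_code
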